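-- pv_equiv track=rewrite | github.com/artemis64/aoc | 2021/advent3b.py | split_array_oxygen
-- ===== SOURCE A (Python) =====
-- def split_array_oxygen(position, data):
-- 	zeros = []
-- 	ones = []
-- 	for number in data:
-- 		if number[position] == '1':
-- 			ones.append(number)
-- 		else:
-- 			zeros.append(number)
-- 	if len(zeros) <= len(ones):
-- 		return ones
-- 	else:
-- 		return zeros
-- ===== SOURCE B (Python) =====
-- def split_array_oxygen(position, data):
-- 	ones_count = sum(1 for number in data if number[position] == '1')
-- 	zeros_count = len(data) - ones_count
-- 	if zeros_count <= ones_count: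
-- 		return [number for number in data if number[position] == '1']
-- 	else:
-- 		return [number for number in data if number[position] != '1']
-- ===== Notes on version B (the rewrite author's own statement) =====
-- stated objective: alternative
-- what changed: B first counts the ones-bits in one scalar pass, derives the zeros count by subtraction, then makes a single filtering pass for the winning group, instead of materialising both partition lists simultaneously.
import Mathlib
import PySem

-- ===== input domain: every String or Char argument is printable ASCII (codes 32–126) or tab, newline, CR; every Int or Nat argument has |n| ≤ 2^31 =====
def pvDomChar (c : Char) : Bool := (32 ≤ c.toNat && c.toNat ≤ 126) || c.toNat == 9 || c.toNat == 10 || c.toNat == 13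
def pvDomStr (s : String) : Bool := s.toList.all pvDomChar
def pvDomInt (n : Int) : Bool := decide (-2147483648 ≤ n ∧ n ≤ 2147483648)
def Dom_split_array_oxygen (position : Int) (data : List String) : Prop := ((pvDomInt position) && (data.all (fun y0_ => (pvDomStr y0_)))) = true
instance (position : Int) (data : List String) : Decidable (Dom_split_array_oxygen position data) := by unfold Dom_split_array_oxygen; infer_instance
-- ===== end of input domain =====

-- B counts the ones-bits in one scalar pass and then filters once for the winning group,
-- instead of building both partition lists simultaneously (objective: alternative decomposition).


-- ===== PORT A =====
-- A's loop: partition data into (zeros, ones) by the character at `position`.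
def pvALoop (position : Int) : List String → List String × List String → List String × List String
  | [], acc => acc
  | number :: rest, (zeros, ones) =>
      if PySem.Str.pyGet? number position == some '1' then
        pvALoop position rest (zeros, ones ++ [number])
      else
        pvALoop position rest (zeros ++ [number], ones)

def split_array_oxygen (position : Int) (data : List String) : List String :=
  let p := pvALoop position data ([], [])
  if p.1.length ≤ p.2.length then p.2 else p.1

-- ===== PORT B =====
def split_array_oxygen_alt (position : Int) (data : List String) : List String :=
  let ones_count := data.countP (fun number => PySem.Str.pyGet? number position == some '1')
  let zeros_count := data.length - ones_count
  if zeros_count ≤ ones_count then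
    data.filter (fun number => PySem.Str.pyGet? number position == some '1')
  else
    data.filter (fun number => !(PySem.Str.pyGet? number position == some '1'))

-- ===== PRECONDITION & SPEC =====
-- Pre_: `number[position]` must be in range for every element, else Python A raises IndexError.
def Pre_split_array_oxygen (position : Int) (data : List String) : Prop :=
  ∀ s ∈ data, PySem.Raise.InRange s.toList.length position
instance (position : Int) (data : List String) : Decidable (Pre_split_array_oxygen position data) := by unfold Pre_split_array_oxygen; infer_instance
def pvWitness_split_array_oxygen : Int × List String := (0, ["10", "01", "11"])

def Spec_split_array_oxygen (position : Int) (data : List String) (out : List String) : Prop := out = split_array_oxygen_alt position data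
instance (position : Int) (data : List String) (out : List String) : Decidable (Spec_split_array_oxygen position data out) := by unfold Spec_split_array_oxygen; infer_instance

-- ===== CLAIM (what is proved, stated in full; the proofs are below) =====
def Claim_equal_split_array_oxygen : Prop := ∀ (position : Int) (data : List String), Dom_split_array_oxygen position data → Pre_split_array_oxygen position data → Spec_split_array_oxygen position data (split_array_oxygen position data)

-- ===== LEMMAS AND PROOFS =====
theorem pvALoop_eq (position : Int) (data zeros ones : List String) :
    pvALoop position data (zeros, ones) =
      (zeros ++ data.filter (fun n => !(PySem.Str.pyGet? n position == some '1')),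
       ones ++ data.filter (fun n => PySem.Str.pyGet? n position == some '1')) := by
  induction data generalizing zeros ones with
  | nil => simp [pvALoop]
  | cons n rest ih =>
    by_cases h : PySem.List.pyGet? n.toList position = some '1'
    · simp [pvALoop, PySem.Str.pyGet?, h, ih]
    · simp [pvALoop, PySem.Str.pyGet?, h, ih]

-- ===== VERDICT (by name: the statement is the Claim_ definition above) =====
theorem pvLenFilterAdd {α : Type} (p : α → Bool) (l : List α) :
    (l.filter p).length + (l.filter (fun a => !p a)).length = l.length := by
  induction l with
  | nil => simp
  | cons x xs ih => by_cases h : p x = true <;> simp [h] <;> omega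

theorem split_array_oxygen_spec : Claim_equal_split_array_oxygen := by
  intro position data _ _
  unfold Spec_split_array_oxygen split_array_oxygen split_array_oxygen_alt
  rw [pvALoop_eq]
  simp only [List.nil_append, List.countP_eq_length_filter]
  have hlen := pvLenFilterAdd (fun n => PySem.Str.pyGet? n position == some '1') data
  simp only at hlen
  split_ifs with hA hB hB <;> first | rfl | (exfalso; omega)
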